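-- pv_equiv track=rewrite | github.com/JunYupK/Algorithm | 대회 및 코테/PCCP 1회/1.py | solution
-- ===== SOURCE A (Python) =====
-- def solution(input_string):
--     answer = []
--     alpha_count ={}
--     result = list(input_string)
--     for i in range(1, len(result)):
--         if result[i-1] == result[i]:
--             result[i-1] = '*'
--     result = "".join(result).replace('*','')
--     for s in result:
--         if s in alpha_count.keys():
--             alpha_count[s] += 1
--         else:
--             alpha_count[s] = 1
--
--     for k,v in alpha_count.items():
--         if v > 1:
--             answer.append(k)
--     answer.sort()
--     answer = "".join(answer)
--     if len(answer) == 0: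
--         return "N"
--     else:
--         return answer
-- ===== SOURCE B (Python) =====
-- def solution(input_string):
--     repeated = []
--     for c in sorted(set(input_string)):
--         tail = input_string[input_string.index(c):]
--         k = 0
--         while k < len(tail) and tail[k] == c:
--             k += 1
--         if c in tail[k:]:
--             repeated.append(c)
--     return "".join(repeated) if repeated else "N"
-- ===== Notes on version B (the rewrite author's own statement) =====
-- stated objective: alternative
-- what changed: B abandons A's collapse-then-count pipeline (mark consecutive duplicates with a '*' sentinel, delete it via str.replace, count the collapsed string into a dict, filter and sort): instead B iterates over the sorted distinct characters and, for each candidate, searches the string for a second occurrence after its first run ends, building the answer already sorted with no collapsed string and no counter; dropping A's four intermediate list/string passes also made it measurably faster (constant factor) on the timing inputs.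
-- intended difference: On inputs where '*' occurs again after the end of its first maximal run (i.e. at least two '*' runs), A's sentinel trick deletes the genuine '*' characters so A omits '*' from its answer (e.g. '*a*' -> 'N'), while B correctly reports '*' as a repeated letter ('*a*' -> '*'), which is the intended count-of-runs semantics. — e.g. on solution("*a*"): A returns "N", B returns "*"
import Mathlib
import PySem

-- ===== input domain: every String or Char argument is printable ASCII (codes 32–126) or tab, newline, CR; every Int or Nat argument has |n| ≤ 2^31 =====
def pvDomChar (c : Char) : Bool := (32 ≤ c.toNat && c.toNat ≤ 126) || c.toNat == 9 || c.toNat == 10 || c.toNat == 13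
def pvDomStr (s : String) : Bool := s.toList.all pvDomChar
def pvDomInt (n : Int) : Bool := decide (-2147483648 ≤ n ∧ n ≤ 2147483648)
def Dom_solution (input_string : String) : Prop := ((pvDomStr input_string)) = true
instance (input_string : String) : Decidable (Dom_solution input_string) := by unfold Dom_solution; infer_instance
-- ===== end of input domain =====

-- B replaces A's collapse-then-count pipeline (sentinel-mark + replace, count the collapsed
-- string, filter/sort) by a per-candidate search: for each distinct character in sorted order,
-- test whether it occurs again after its first run ends (alternative decomposition, no counter,
-- answer built already sorted). On inputs with ≥ 2 maximal '*' runs A's sentinel deletes genuine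
-- '*' characters (stated as D_solution below).

-- ===== PORT A =====
def solution (input_string : String) : String :=
  let result := input_string.toList
  let result := (PySem.List.pyRange 1 result.length 1).foldl
      (fun r i =>
        if PySem.List.pyGetD r (i - 1) ' ' = PySem.List.pyGetD r i ' ' then
          PySem.List.pySetD r (i - 1) '*'
        else r) result
  let result := PySem.Chars.replace result ['*'] []
  let alpha_count := result.foldl
      (fun (d : PySem.Dict Char Int) s =>
        if d.contains s then d.modify s 0 (· + 1) else d.insert s 1)
      PySem.Dict.empty
  let answer := alpha_count.items.foldl
      (fun (a : List Char) kv => if kv.2 > 1 then a ++ [kv.1] else a) []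
  let answer := PySem.List.sorted answer (fun x => x) false
  if answer.length = 0 then "N" else String.ofList answer

-- ===== PORT B =====
def solution_alt (input_string : String) : String :=
  let repeated := (PySem.List.sorted (PySem.Set.ofList input_string.toList) (fun x => x) false).foldl
      (fun (acc : List Char) c =>
        -- input_string[input_string.index(c):] is the suffix from the FIRST occurrence of c,
        -- i.e. dropWhile (· ≠ c); exact because index returns the first occurrence
        let tail := input_string.toList.dropWhile (· ≠ c)
        -- the while-loop advances k past the leading run of c, so tail[k:] = dropWhile (· = c)
        let rest := tail.dropWhile (· = c)
        if rest.contains c then acc ++ [c] else acc) []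
  if repeated = [] then "N" else String.ofList repeated

-- ===== PRECONDITION & SPEC =====
-- On inputs where '*' occurs again after the end of its first maximal run (i.e. '*' begins ≥ 2 runs),
-- A's sentinel trick deletes the genuine '*' characters so A omits '*' from its answer
-- (e.g. "*a*" → "N"), while B reports '*' as repeated ("*a*" → "*"), the intended
-- count-of-runs semantics.
def D_solution (input_string : String) : Prop :=
  '*' ∈ (input_string.toList.dropWhile (· ≠ '*')).dropWhile (· = '*')
instance (input_string : String) : Decidable (D_solution input_string) := by
  unfold D_solution; infer_instance

def Spec_solution (input_string : String) (out : String) : Prop :=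
  ¬ D_solution input_string → out = solution_alt input_string
instance (input_string : String) (out : String) : Decidable (Spec_solution input_string out) := by
  unfold Spec_solution; infer_instance

def pvDiffWitness_solution : String := "*a*"
def pvDiffWitnessOut_solution : String × String := ("N", "*")

-- ===== CLAIM (what is proved, stated in full; the proofs are below) =====
def Claim_unchanged_solution : Prop := ∀ (input_string : String), Dom_solution input_string → Spec_solution input_string (solution input_string)
def Claim_changed_solution : Prop := Dom_solution (pvDiffWitness_solution) ∧ D_solution (pvDiffWitness_solution) ∧ solution (pvDiffWitness_solution) = pvDiffWitnessOut_solution.1 ∧ solution_alt (pvDiffWitness_solution) = pvDiffWitnessOut_solution.2 ∧ pvDiffWitnessOut_solution.1 ≠ pvDiffWitnessOut_solution.2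
def Claim_exact_solution : Prop := ∀ (input_string : String), Dom_solution input_string → D_solution input_string → solution input_string ≠ solution_alt input_string

-- ===== LEMMAS AND PROOFS =====

-- the characters beginning the maximal runs of the input, one per run, in order
def runFrom : Option Char → List Char → List Char
  | _, [] => []
  | p, c :: t => if some c ≠ p then c :: runFrom (some c) t else runFrom (some c) t

-- A's first loop, seen structurally: each character equal to its successor becomes '*'
def mark : List Char → List Char
  | [] => []
  | [a] => [a]
  | a :: b :: t => (if a = b then '*' else a) :: mark (b :: t)

-- the keys of the counter of xs whose count exceeds 1 (shape of A's answer)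
def selKeys (xs : List Char) : List Char :=
  (PySem.Set.ofList xs).filter (fun k => decide ((1 : Int) < (List.count k xs : Int)))

-- what remains of l after the first run of c (B's per-candidate residue)
def restOf (c : Char) (l : List Char) : List Char :=
  (l.dropWhile (· ≠ c)).dropWhile (· = c)

-- the replace('*','') stage is a filter
theorem replace_go_star : ∀ (fuel : Nat) (l acc : List Char), l.length ≤ fuel →
    PySem.Chars.replace.go ['*'] [] fuel l acc = acc.reverse ++ l.filter (· ≠ '*') := by
  intro fuel
  induction fuel with
  | zero => intro l acc h; cases l with
    | nil => simp [PySem.Chars.replace.go]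
    | cons c t => simp at h
  | succ n ih =>
    intro l acc h
    cases l with
    | nil => simp [PySem.Chars.replace.go]
    | cons c t =>
      by_cases hc : c = '*'
      · subst hc
        have hp : (['*'].isPrefixOf ('*' :: t)) = true := by simp [List.isPrefixOf]
        simp only [PySem.Chars.replace.go, hp, if_pos]
        rw [ih _ _ (by simp at h ⊢; omega)]; simp
      · have hp : (['*'].isPrefixOf (c :: t)) = false := by
          simp [List.isPrefixOf]; exact fun h' => absurd h'.symm hc
        simp only [PySem.Chars.replace.go, hp]
        rw [ih t (c :: acc) (by simp at h ⊢; omega)]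
        simp [hc]

theorem replace_star (l : List Char) :
    PySem.Chars.replace l ['*'] [] = l.filter (· ≠ '*') := by
  rw [PySem.Chars.replace]
  simp [replace_go_star l.length l [] (le_refl _)]

-- A's index loop computes mark
theorem loop_mark_aux : ∀ (m k : Nat) (r : List Char), m = r.length - (k + 1) → k + 1 ≤ r.length →
    (PySem.List.pyRange ((k : Int) + 1) (r.length : Int) 1).foldl
      (fun r i =>
        if PySem.List.pyGetD r (i - 1) ' ' = PySem.List.pyGetD r i ' ' then
          PySem.List.pySetD r (i - 1) '*'
        else r) r = r.take k ++ mark (r.drop k) := by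
  intro m
  induction m with
  | zero =>
    intro k r hm hk
    have hlen : r.length = k + 1 := by omega
    rw [PySem.List.pyRange_one_eq_nil (by omega : (r.length:Int) ≤ (k:Int)+1)]
    simp only [List.foldl_nil]
    have he : r.drop (k+1) = [] := List.drop_eq_nil_of_le (by omega)
    rw [List.drop_eq_getElem_cons (by omega : k < r.length), he]
    rw [show mark [r[k]'(by omega)] = [r[k]'(by omega)] from rfl]
    rw [← he, ← List.drop_eq_getElem_cons (by omega : k < r.length), List.take_append_drop]
  | succ n ih =>
    intro k r hm hk
    have hk2 : k + 1 < r.length := by omega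
    rw [PySem.List.pyRange_one_cons (by exact_mod_cast (by omega : (k:Int)+1 < (r.length:Int)))]
    simp only [List.foldl_cons]
    have hg1 : PySem.List.pyGetD r ((k:Int) + 1 - 1) ' ' = r[k]'(by omega) := by
      rw [show ((k:Int)+1-1) = (k:Int) by ring]
      rw [PySem.List.pyGetD_eq_getElem r ' ' (by positivity) (by exact_mod_cast (by omega : k < r.length))]
      simp
    have hg2 : PySem.List.pyGetD r ((k:Int) + 1) ' ' = r[k+1]'(by omega) := by
      rw [show ((k:Int)+1) = ((k+1:Nat):Int) by push_cast; ring]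
      rw [PySem.List.pyGetD_eq_getElem r ' ' (by positivity) (by exact_mod_cast hk2)]
      simp
    rw [hg1, hg2]
    have hmark : mark (r.drop k)
        = (if r[k]'(by omega) = r[k+1]'(by omega) then '*' else r[k]'(by omega)) :: mark (r.drop (k+1)) := by
      rw [List.drop_eq_getElem_cons (by omega : k < r.length),
        List.drop_eq_getElem_cons (by omega : k+1 < r.length)]
      rfl
    by_cases he : r[k]'(by omega) = r[k+1]'(by omega)
    · rw [if_pos he]
      rw [show ((k:Int)+1-1) = (k:Int) by ring]
      rw [PySem.List.pySetD_of_nonneg r '*' (by positivity)]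
      have htn : ((k:Int)).toNat = k := by simp
      rw [htn]
      set r' := r.set k '*' with hr'
      have hlen' : r'.length = r.length := by simp [hr']
      have hrep : r' = r.take k ++ '*' :: r.drop (k+1) := List.set_eq_take_cons_drop '*' (by omega)
      have hih := ih (k+1) r' (by rw [hlen']; omega) (by rw [hlen']; omega)
      rw [show ((k:Int)+1+1) = ((k+1:Nat):Int)+1 by push_cast; ring, ← hlen']
      rw [hih]
      have htake : r'.take (k+1) = r.take k ++ ['*'] := by
        rw [hrep, List.take_append]
        have h1 : (r.take k).length = k := by simp; omega
        rw [List.take_of_length_le (by omega), h1]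
        norm_num
      have hdrop : r'.drop (k+1) = r.drop (k+1) := by
        rw [hrep, List.drop_append]
        have h1 : (r.take k).length = k := by simp; omega
        rw [List.drop_eq_nil_of_le (by omega), h1]
        norm_num
      rw [htake, hdrop, hmark, if_pos he]
      simp
    · rw [if_neg he]
      have hih := ih (k+1) r (by omega) (by omega)
      rw [show ((k:Int)+1+1) = ((k+1:Nat):Int)+1 by push_cast; ring]
      rw [hih, hmark, if_neg he,
        List.take_succ_eq_append_getElem (by omega : k < r.length), List.append_assoc,
        List.singleton_append]

theorem loop_mark (l : List Char) :
    (PySem.List.pyRange 1 (l.length : Int) 1).foldl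
      (fun r i =>
        if PySem.List.pyGetD r (i - 1) ' ' = PySem.List.pyGetD r i ' ' then
          PySem.List.pySetD r (i - 1) '*'
        else r) l = mark l := by
  cases l with
  | nil => simp [PySem.List.pyRange_one_eq_nil, mark]
  | cons a t =>
    have := loop_mark_aux (a :: t).length.pred 0 (a :: t) (by simp) (by simp)
    simpa using this

-- marked-then-filtered = run-starts-then-filtered
theorem mark_filter_aux : ∀ (l : List Char) (a : Char),
    (mark (a :: l)).filter (· ≠ '*') = ((a :: runFrom (some a) l)).filter (· ≠ '*') := by
  intro l
  induction l with
  | nil => intro a; simp [mark, runFrom]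
  | cons b t ih =>
    intro a
    by_cases hab : a = b
    · subst hab
      rw [show mark (a :: a :: t) = '*' :: mark (a :: t) by simp [mark]]
      rw [show runFrom (some a) (a :: t) = runFrom (some a) t by simp [runFrom]]
      rw [List.filter_cons, List.filter_cons]
      rw [show (decide ('*' ≠ '*')) = false by decide, if_neg (by simp)]
      have := ih a
      rw [List.filter_cons] at this
      rw [this]
    · rw [show mark (a :: b :: t) = a :: mark (b :: t) by simp [mark, hab]]
      rw [show runFrom (some a) (b :: t) = b :: runFrom (some b) t by
        simp [runFrom, Ne.symm hab]]
      rw [List.filter_cons, List.filter_cons]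
      have := ih b
      rw [List.filter_cons] at this
      rw [this, List.filter_cons]

theorem mark_filter (l : List Char) :
    (mark l).filter (· ≠ '*') = (runFrom none l).filter (· ≠ '*') := by
  cases l with
  | nil => simp [mark, runFrom]
  | cons a t =>
    rw [mark_filter_aux t a]
    rw [show runFrom none (a :: t) = a :: runFrom (some a) t by simp [runFrom]]

-- A's counting loop is Counter
theorem astep_eq (d : PySem.Dict Char Int) (s : Char) :
    (if d.contains s then d.modify s 0 (· + 1) else d.insert s 1) = d.modify s 0 (· + 1) := by
  by_cases h : d.contains s = true
  · simp [h]
  · simp only [Bool.not_eq_true] at h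
    simp [h, PySem.Dict.modify, PySem.Dict.getD_of_not_contains d 0 h]

theorem afold_counter (xs : List Char) :
    xs.foldl (fun (d : PySem.Dict Char Int) s =>
        if d.contains s then d.modify s 0 (· + 1) else d.insert s 1) PySem.Dict.empty
      = PySem.Dict.counter xs := by
  rw [PySem.Dict.counter_eq_foldl]
  congr 1
  funext d s
  exact astep_eq d s

-- the filtered key list of a Counter
theorem counter_sel (xs : List Char) :
    ((PySem.Dict.counter xs).items.filter (fun kv => kv.2 > 1)).map (·.1) = selKeys xs := by
  rw [PySem.Dict.items_counter, List.filter_map, List.map_map]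
  simp [selKeys, Function.comp_def, gt_iff_lt]

-- A's answer-building loop, as filter of the items
theorem keysel (xs : List Char) :
    ((PySem.Dict.counter xs).items.foldl
      (fun (a : List Char) kv => if kv.2 > 1 then a ++ [kv.1] else a) []) = selKeys xs := by
  rw [← counter_sel xs]
  have := PySem.List.foldl_append_if (fun kv : Char × Int => decide ((1:Int) < kv.2))
    (·.1) (PySem.Dict.counter xs).items []
  simpa using this

-- canonical form of port A
theorem solutionA_canon (s : String) :
    solution s =
      (if (PySem.List.sorted (selKeys ((runFrom none s.toList).filter (· ≠ '*')))
          (fun x => x) false).length = 0 then "N"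
       else String.ofList (PySem.List.sorted (selKeys ((runFrom none s.toList).filter (· ≠ '*')))
          (fun x => x) false)) := by
  unfold solution
  simp only [loop_mark, replace_star, mark_filter, afold_counter, keysel]

-- counting c among run starts does not depend on a previous char other than c
theorem count_runFrom_ne (c : Char) (l : List Char) (p : Option Char) (hp : p ≠ some c) :
    (runFrom p l).count c = (runFrom none l).count c := by
  cases l with
  | nil => rfl
  | cons h t =>
    by_cases hh : some h ≠ p
    · rw [show runFrom p (h :: t) = h :: runFrom (some h) t by simp [runFrom, hh]]
      rw [show runFrom none (h :: t) = h :: runFrom (some h) t by simp [runFrom]]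
    · rw [not_not] at hh
      have hhc : h ≠ c := by intro he; exact hp (by rw [← hh, he])
      rw [show runFrom p (h :: t) = runFrom (some h) t by simp [runFrom, hh]]
      rw [show runFrom none (h :: t) = h :: runFrom (some h) t by simp [runFrom]]
      rw [List.count_cons_of_ne hhc]

-- membership among run starts = membership, when the previous char differs
theorem mem_runFrom (c : Char) : ∀ (l : List Char) (p : Option Char), p ≠ some c →
    (c ∈ runFrom p l ↔ c ∈ l) := by
  intro l
  induction l with
  | nil => intro p _; simp [runFrom]
  | cons h t ih =>
    intro p hp
    by_cases hh : h = c
    · subst hh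
      rw [show runFrom p (h :: t) = h :: runFrom (some h) t by
        simp [runFrom, Ne.symm hp]]
      simp
    · have hsome : (some h : Option Char) ≠ some c := by simpa using hh
      by_cases hhp : some h ≠ p
      · rw [show runFrom p (h :: t) = h :: runFrom (some h) t by simp [runFrom, hhp]]
        simp [ih (some h) hsome, Ne.symm hh]
      · rw [not_not] at hhp
        rw [show runFrom p (h :: t) = runFrom (some h) t by simp [runFrom, hhp]]
        simp [ih (some h) hsome, Ne.symm hh]

-- dropping the leading run of c does not change c's run-start count after a c
theorem count_runFrom_dropRun (c : Char) : ∀ (t : List Char),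
    (runFrom (some c) (t.dropWhile (· = c))).count c = (runFrom (some c) t).count c := by
  intro t
  induction t with
  | nil => rfl
  | cons d t' ih =>
    by_cases hd : d = c
    · subst hd
      rw [show (d :: t').dropWhile (· = d) = t'.dropWhile (· = d) by simp [List.dropWhile]]
      rw [show runFrom (some d) (d :: t') = runFrom (some d) t' by simp [runFrom]]
      exact ih
    · rw [show (d :: t').dropWhile (· = c) = d :: t' by simp [List.dropWhile, hd]]

-- run-start count of a present character = 1 + its run-start count in restOf
theorem count_runFrom_restOf (c : Char) : ∀ (l : List Char), c ∈ l →
    (runFrom none l).count c = 1 + (runFrom (some c) (restOf c l)).count c := by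
  intro l
  induction l with
  | nil => intro h; simp at h
  | cons h t ih =>
    intro hmem
    by_cases hh : h = c
    · subst hh
      rw [show restOf h (h :: t) = t.dropWhile (· = h) by
        simp [restOf, List.dropWhile]]
      rw [show runFrom none (h :: t) = h :: runFrom (some h) t by simp [runFrom]]
      rw [List.count_cons_self, count_runFrom_dropRun]
      omega
    · have hmt : c ∈ t := by
        rcases List.mem_cons.mp hmem with h1 | h1
        · exact absurd h1.symm hh
        · exact h1
      rw [show restOf c (h :: t) = restOf c t by simp [restOf, List.dropWhile, hh]]
      rw [show runFrom none (h :: t) = h :: runFrom (some h) t by simp [runFrom]]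
      rw [List.count_cons_of_ne hh]
      rw [count_runFrom_ne c t (some h) (by simpa using hh)]
      exact ih hmt

-- c begins a later run iff it still occurs after its first run
theorem mem_runFrom_restOf (c : Char) (l : List Char) :
    (c ∈ runFrom (some c) (restOf c l) ↔ c ∈ restOf c l) := by
  have hhead := List.head?_dropWhile_not (· = c) (l.dropWhile (· ≠ c))
  cases hr : restOf c l with
  | nil => simp [runFrom]
  | cons d t =>
    have hd : d ≠ c := by
      have : ((l.dropWhile (· ≠ c)).dropWhile (· = c)).head? = some d := by
        rw [← restOf, hr]; rfl
      have := hhead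
      rw [show (l.dropWhile (· ≠ c)).dropWhile (fun x => x = c) = restOf c l from rfl] at this
      rw [hr] at this
      simpa using this
    rw [show runFrom (some c) (d :: t) = d :: runFrom (some d) t by
      simp [runFrom, hd]]
    simp [mem_runFrom c t (some d) (by simpa using hd), Ne.symm hd]

-- full membership characterisation of B's per-candidate test
theorem restOf_iff_count (c : Char) (l : List Char) :
    (c ∈ l ∧ c ∈ restOf c l) ↔ 1 < (runFrom none l).count c := by
  constructor
  · rintro ⟨hl, hr⟩
    rw [count_runFrom_restOf c l hl]
    have : c ∈ runFrom (some c) (restOf c l) := (mem_runFrom_restOf c l).mpr hr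
    have := List.count_pos_iff.mpr this
    omega
  · intro hc
    have hl : c ∈ l := by
      by_contra hni
      have : c ∉ runFrom none l := fun hm => hni ((mem_runFrom c l none (by simp)).mp hm)
      rw [List.count_eq_zero_of_not_mem this] at hc
      omega
    refine ⟨hl, ?_⟩
    rw [count_runFrom_restOf c l hl] at hc
    have : 0 < (runFrom (some c) (restOf c l)).count c := by omega
    exact (mem_runFrom_restOf c l).mp (List.count_pos_iff.mp this)

-- canonical form of port B
theorem solutionB_canon (s : String) :
    solution_alt s =
      (if PySem.List.sorted (selKeys (runFrom none s.toList)) (fun x => x) false = [] then "N"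
       else String.ofList (PySem.List.sorted (selKeys (runFrom none s.toList)) (fun x => x) false)) := by
  unfold solution_alt
  set l := s.toList with hl
  set cs := PySem.List.sorted (PySem.Set.ofList l) (fun x => x) false with hcs
  have hfold : cs.foldl
      (fun (acc : List Char) c =>
        if ((l.dropWhile (· ≠ c)).dropWhile (· = c)).contains c then acc ++ [c] else acc) []
      = cs.filter (fun c => ((l.dropWhile (· ≠ c)).dropWhile (· = c)).contains c) := by
    have := PySem.List.foldl_append_if
      (fun c => ((l.dropWhile (· ≠ c)).dropWhile (· = c)).contains c) (fun c => c) cs []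
    simpa using this
  rw [hfold]
  have hlt : (cs.filter (fun c => ((l.dropWhile (· ≠ c)).dropWhile (· = c)).contains c)).Pairwise (· < ·) :=
    List.Pairwise.filter _ (PySem.List.sorted_ofList_pairwise_lt l)
  have hperm : (cs.filter (fun c => ((l.dropWhile (· ≠ c)).dropWhile (· = c)).contains c)).Perm
      (selKeys (runFrom none l)) := by
    apply (List.perm_ext_iff_of_nodup (hlt.imp ne_of_lt)
      ((PySem.Set.nodup_ofList _).filter _)).mpr
    intro c
    rw [List.mem_filter, List.mem_filter, PySem.Set.mem_ofList]
    rw [hcs, PySem.List.mem_sorted, PySem.Set.mem_ofList]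
    have hrest : (((l.dropWhile (· ≠ c)).dropWhile (· = c)).contains c = true) ↔ c ∈ restOf c l := by
      simp [restOf]
    rw [hrest]
    rw [decide_eq_true_eq]
    constructor
    · rintro ⟨hcl, hcr⟩
      have := (restOf_iff_count c l).mp ⟨hcl, hcr⟩
      refine ⟨(mem_runFrom c l none (by simp)).mpr hcl, by exact_mod_cast this⟩
    · rintro ⟨hm, hc⟩
      have hc' : 1 < (runFrom none l).count c := by exact_mod_cast hc
      exact (restOf_iff_count c l).mpr hc'
  have hs := PySem.List.sorted_eq_of_perm_of_pairwise_lt _ _ (fun x => x) hperm hlt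
  rw [hs]

-- the two selected key lists are a permutation of each other when '*' starts at most one run
theorem sel_perm (xs : List Char) (h : xs.count '*' ≤ 1) :
    (selKeys (xs.filter (· ≠ '*'))).Perm (selKeys xs) := by
  apply (List.perm_ext_iff_of_nodup ((PySem.Set.nodup_ofList _).filter _)
    ((PySem.Set.nodup_ofList _).filter _)).mpr
  intro a
  simp only [List.mem_filter, PySem.Set.mem_ofList, decide_eq_true_eq]
  constructor
  · rintro ⟨⟨ha, hne⟩, hc⟩
    rw [List.count_filter (by simpa using hne)] at hc
    exact ⟨ha, hc⟩
  · rintro ⟨ha, hc⟩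
    by_cases hne : a = '*'
    · exfalso; subst hne
      have h1 : ((List.count '*' xs : Int)) ≤ 1 := by exact_mod_cast h
      omega
    · refine ⟨⟨ha, hne⟩, ?_⟩
      rw [List.count_filter (by simpa using hne)]
      exact hc

-- '*' is never selected on the A side
theorem star_not_mem_selA (xs : List Char) : '*' ∉ selKeys (xs.filter (· ≠ '*')) := by
  intro hmem
  have := (List.mem_filter.mp hmem).1
  have := List.mem_filter.mp ((PySem.Set.mem_ofList _ _).mp this)
  simpa using this.2

-- ===== VERDICT (by name: the statement is the Claim_ definition above) =====
theorem solution_spec : Claim_unchanged_solution := by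
  intro s _ hD
  have h1 : (runFrom none s.toList).count '*' ≤ 1 := by
    by_contra hgt
    exact hD ((restOf_iff_count '*' s.toList).mpr (by omega)).2
  rw [solutionA_canon, solutionB_canon,
    (PySem.List.sorted_id_eq_sorted_id_iff_perm _ _).mpr (sel_perm _ h1)]
  rcases eq_or_ne (PySem.List.sorted (selKeys (runFrom none s.toList)) (fun x => x) false) [] with h | h
  · rw [h]; rfl
  · rw [if_neg h, if_neg (by rw [List.length_eq_zero_iff]; exact h)]

theorem solution_changed : Claim_changed_solution := by
  unfold Claim_changed_solution; decide

theorem solution_tight : Claim_exact_solution := by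
  intro s _ hDm
  have hres : '*' ∈ restOf '*' s.toList := hDm
  have hD : 1 < (runFrom none s.toList).count '*' :=
    (restOf_iff_count '*' s.toList).mp
      ⟨(List.dropWhile_sublist _).subset ((List.dropWhile_sublist _).subset hres), hres⟩
  rw [solutionA_canon, solutionB_canon]
  have hmemB : '*' ∈ PySem.List.sorted (selKeys (runFrom none s.toList)) (fun x => x) false := by
    rw [PySem.List.mem_sorted]
    refine List.mem_filter.mpr ⟨(PySem.Set.mem_ofList _ _).mpr (List.count_pos_iff.mp (by omega)), ?_⟩
    simp only [decide_eq_true_eq]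
    exact_mod_cast (by omega : (1:Nat) < (runFrom none s.toList).count '*')
  have hnotA : '*' ∉ PySem.List.sorted (selKeys ((runFrom none s.toList).filter (· ≠ '*')))
      (fun x => x) false := by
    rw [PySem.List.mem_sorted]
    exact star_not_mem_selA _
  have hBne : PySem.List.sorted (selKeys (runFrom none s.toList)) (fun x => x) false ≠ [] := by
    intro h; rw [h] at hmemB; simp at hmemB
  rw [if_neg hBne]
  intro hEq
  split at hEq
  · have := congrArg String.toList hEq
    simp only [String.toList_ofList] at this
    rw [← this] at hmemB
    simp at hmemB
  · have := congrArg String.toList hEq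
    simp only [String.toList_ofList] at this
    rw [← this] at hmemB
    exact hnotA hmemB
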